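-- pv_equiv track=rewrite | github.com/minnesotanlp/cobbler | competitive-llms/analyze.py | normalize_ranks
-- ===== SOURCE A (Python) =====
-- def normalize_ranks(scores):
--     data = scores
--     points_dict = {}
--     for model, points in data.items():
--         if points not in points_dict:
--             points_dict[points] = []
--         points_dict[points].append(model)
--
--     # Sort the points in descending order
--     sorted_points = sorted(points_dict.keys(), reverse=True)
--
--     # Create a nested list of models based on points
--     result = []
--     for points in sorted_points:
--         models = points_dict[points]
--         result.append(models)
--     return result
-- ===== SOURCE B (Python) =====
-- def normalize_ranks(scores):
--     pts = sorted({p for p in scores.values()}, reverse=True)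
--     return [[m for m, p in scores.items() if p == pt] for pt in pts]
-- ===== Notes on version B (the rewrite author's own statement) =====
-- stated objective: simpler
-- what changed: A builds a points->models bucket dict in one pass then reads buckets in sorted-key order; B never builds buckets: it sorts the distinct score values descending and produces each group by a direct filter over the items.
import Mathlib
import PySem

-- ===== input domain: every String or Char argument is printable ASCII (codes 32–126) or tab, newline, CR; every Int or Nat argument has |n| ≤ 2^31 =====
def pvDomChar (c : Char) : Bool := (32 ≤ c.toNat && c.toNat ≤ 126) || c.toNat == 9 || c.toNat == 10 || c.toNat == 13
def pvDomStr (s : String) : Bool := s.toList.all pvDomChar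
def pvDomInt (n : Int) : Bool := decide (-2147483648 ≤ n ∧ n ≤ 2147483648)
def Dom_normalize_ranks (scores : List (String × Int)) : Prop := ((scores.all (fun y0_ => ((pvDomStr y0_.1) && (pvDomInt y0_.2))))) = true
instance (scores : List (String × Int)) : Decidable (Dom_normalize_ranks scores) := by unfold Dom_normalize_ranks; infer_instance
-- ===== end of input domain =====

-- B replaces A's bucket-dict pass with: sort the distinct scores descending, then one filter per group (objective: simpler).


-- ===== PORT A =====
def normalize_ranks (scores : List (String × Int)) : List (List String) :=
  -- data = scores; for model, points in data.items(): if points not in points_dict: points_dict[points] = []; points_dict[points].append(model)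
  let points_dict : PySem.Dict Int (List String) :=
    scores.foldl (fun d mp =>
      (if d.contains mp.2 then d else d.insert mp.2 ([] : List String)).modify mp.2 []
        (· ++ [mp.1])) PySem.Dict.empty
  -- sorted_points = sorted(points_dict.keys(), reverse=True)
  let sorted_points := PySem.List.sorted points_dict.keys (fun x => x) true
  -- result = []; for points in sorted_points: result.append(points_dict[points])  (the key is always present, so getD is exact)
  sorted_points.foldl (fun result points => result ++ [points_dict.getD points []]) []

-- ===== PORT B =====
def normalize_ranks_alt (scores : List (String × Int)) : List (List String) :=
  let pts := PySem.List.sorted (PySem.Set.ofList (scores.map (·.2))) (fun x => x) true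
  pts.map (fun pt => (scores.filter (fun mp => mp.2 == pt)).map (·.1))

-- ===== PRECONDITION & SPEC =====
def Spec_normalize_ranks (scores : List (String × Int)) (out : List (List String)) : Prop := out = normalize_ranks_alt scores
instance (scores : List (String × Int)) (out : List (List String)) : Decidable (Spec_normalize_ranks scores out) := by unfold Spec_normalize_ranks; infer_instance

-- ===== CLAIM (what is proved, stated in full; the proofs are below) =====
def Claim_equal_normalize_ranks : Prop := ∀ (scores : List (String × Int)), Dom_normalize_ranks scores → Spec_normalize_ranks scores (normalize_ranks scores)

-- ===== LEMMAS AND PROOFS =====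

-- A's bucket for any score c holds exactly the models whose score is c, in input order
theorem pvBuild_getD (l : List (String × Int)) (c : Int) :
    ∀ d : PySem.Dict Int (List String),
    (l.foldl (fun d mp =>
        (if d.contains mp.2 then d else d.insert mp.2 ([] : List String)).modify mp.2 []
          (· ++ [mp.1])) d).getD c []
      = d.getD c [] ++ (l.filter (fun mp => mp.2 == c)).map (·.1) := by
  induction l with
  | nil => simp
  | cons mp t ih =>
    intro d
    simp only [List.foldl_cons, List.filter_cons]
    rw [ih, PySem.Dict.getD_modify]
    by_cases h : c = mp.2
    · rw [if_pos h]
      have hfix : (if d.contains mp.2 = true then d else d.insert mp.2 ([] : List String)).getD mp.2 []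
          = d.getD mp.2 [] := by
        by_cases hc : d.contains mp.2 = true
        · rw [if_pos hc]
        · rw [if_neg hc, PySem.Dict.getD_insert_self,
            PySem.Dict.getD_of_not_contains _ _ (by simpa using hc)]
      rw [hfix]
      subst h
      simp [List.append_assoc]
    · rw [if_neg h]
      have hne : (mp.2 == c) = false := by
        simp only [beq_eq_false_iff_ne, ne_eq]
        exact fun e => h e.symm
      by_cases hc : d.contains mp.2 = true
      · rw [if_pos hc]; simp [hne]
      · rw [if_neg hc, PySem.Dict.getD_insert, if_neg h]; simp [hne]

-- A's dict keys are the distinct scores in first-occurrence order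
theorem pvBuild_keys (l : List (String × Int)) :
    ∀ d : PySem.Dict Int (List String),
    (l.foldl (fun d mp =>
        (if d.contains mp.2 then d else d.insert mp.2 ([] : List String)).modify mp.2 []
          (· ++ [mp.1])) d).keys
      = PySem.Set.update d.keys (l.map (·.2)) := by
  induction l with
  | nil => intro d; simp [PySem.Set.update_nil]
  | cons mp t ih =>
    intro d
    simp only [List.foldl_cons, List.map_cons]
    rw [ih, PySem.Set.update_cons]
    congr 1
    by_cases hc : d.contains mp.2 = true
    · rw [if_pos hc, PySem.Dict.keys_modify, PySem.Dict.keys_insert_of_contains d _ hc,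
        PySem.Set.add_of_mem ((PySem.Dict.contains_iff_mem_keys d mp.2).mp hc)]
    · rw [if_neg hc, PySem.Dict.keys_modify,
        PySem.Dict.keys_insert_of_contains _ _ (PySem.Dict.contains_insert_self _ _ _),
        PySem.Dict.keys_insert_of_not_contains d _ (by simpa using hc),
        PySem.Set.add_of_not_mem (fun hm =>
          hc ((PySem.Dict.contains_iff_mem_keys d mp.2).mpr hm))]

-- ===== VERDICT (by name: the statement is the Claim_ definition above) =====
theorem normalize_ranks_spec : Claim_equal_normalize_ranks := by
  intro scores _
  unfold Spec_normalize_ranks normalize_ranks normalize_ranks_alt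
  simp only [PySem.List.foldl_append_singleton_eq_map, List.nil_append,
    pvBuild_keys, PySem.Dict.keys_empty, PySem.Set.update_nil_left]
  exact List.map_congr_left (fun p _ => by rw [pvBuild_getD]; simp)
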